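-- pv_equiv track=rewrite | github.com/vsrin/coversight-poldnaext | src/element_classifier.py | _is_simple_element
-- ===== SOURCE A (Python) =====
-- from typing import Dict, List, Optional, Any
--
-- def _is_simple_element(element: Dict, element_type: str) -> bool:
--     """
--     Determine if an element is simple enough to skip refined classification.
--
--     Args:
--         element: The element to check
--         element_type: The initial element type
--
--     Returns:
--         Boolean indicating if this is a simple element
--     """
--     element_text = element.get('text', '').lower()
--
--     # Simple checks based on element type and text patterns
--     if element_type == "DEFINITION" and '"' in element_text and " means " in element_text:
--         return True
--     elif element_type == "EXCLUSION" and any(x in element_text for x in ["not cover", "does not", "excluded", "except", "exclusion"]):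
--         return True
--     elif element_type == "COVERAGE_GRANT" and any(x in element_text for x in ["we will pay", "we cover", "this policy covers"]):
--         return True
--     elif element_type == "CONDITION" and any(x in element_text for x in ["condition", "must be", "required to", "you must", "insured shall"]):
--         return True
--     elif element_type == "SUB_LIMIT" and any(x in element_text for x in ["limit of", "$", "maximum of", "up to"]) and any(y in element_text for y in ["per", "for", "each"]):
--         return True
--
--     # By default, get refined classification
--     return False
-- ===== SOURCE B (Python) =====
-- RULES = {
--     "DEFINITION": [['"'], [" means "]],
--     "EXCLUSION": [["not cover", "does not", "excluded", "except", "exclusion"]],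
--     "COVERAGE_GRANT": [["we will pay", "we cover", "this policy covers"]],
--     "CONDITION": [["condition", "must be", "required to", "you must", "insured shall"]],
--     "SUB_LIMIT": [["limit of", "$", "maximum of", "up to"], ["per", "for", "each"]],
-- }
--
-- def _is_simple_element(element, element_type):
--     text = element.get('text', '').lower()
--     groups = RULES.get(element_type)
--     if groups is None:
--         return False
--     return all(any(sub in text for sub in group) for group in groups)
-- ===== Notes on version B (the rewrite author's own statement) =====
-- stated objective: simpler
-- what changed: Replaces the five-branch if/elif chain with a single data table mapping element_type to requirement groups, evaluated by one generic all(any(...)) fold with default False.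
import Mathlib
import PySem

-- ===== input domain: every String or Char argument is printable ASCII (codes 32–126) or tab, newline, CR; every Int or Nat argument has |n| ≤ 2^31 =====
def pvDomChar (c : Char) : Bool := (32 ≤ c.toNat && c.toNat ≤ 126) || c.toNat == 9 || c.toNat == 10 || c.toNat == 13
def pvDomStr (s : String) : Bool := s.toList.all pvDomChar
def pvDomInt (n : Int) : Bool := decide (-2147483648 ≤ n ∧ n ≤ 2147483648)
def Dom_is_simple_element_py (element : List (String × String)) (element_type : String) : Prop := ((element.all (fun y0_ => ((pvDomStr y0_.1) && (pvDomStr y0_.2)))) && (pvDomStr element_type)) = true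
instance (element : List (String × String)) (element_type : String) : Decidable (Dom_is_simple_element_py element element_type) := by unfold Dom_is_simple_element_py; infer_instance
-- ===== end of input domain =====

-- B replaces A's five-branch if/elif chain with a rules table and one generic all/any fold (objective: simpler).

-- ===== PORT A =====
def is_simple_element_py (element : List (String × String)) (element_type : String) : Bool :=
  let element_text := PySem.Str.lower (((PySem.Dict.mk element).get? "text").getD "")
  if element_type == "DEFINITION" && PySem.Str.isIn "\"" element_text && PySem.Str.isIn " means " element_text then
    true
  else if element_type == "EXCLUSION" && (["not cover", "does not", "excluded", "except", "exclusion"].any (fun x => PySem.Str.isIn x element_text)) then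
    true
  else if element_type == "COVERAGE_GRANT" && (["we will pay", "we cover", "this policy covers"].any (fun x => PySem.Str.isIn x element_text)) then
    true
  else if element_type == "CONDITION" && (["condition", "must be", "required to", "you must", "insured shall"].any (fun x => PySem.Str.isIn x element_text)) then
    true
  else if element_type == "SUB_LIMIT" && (["limit of", "$", "maximum of", "up to"].any (fun x => PySem.Str.isIn x element_text)) && (["per", "for", "each"].any (fun y => PySem.Str.isIn y element_text)) then
    true
  else
    false

-- ===== PORT B =====
def pvRules : PySem.Dict String (List (List String)) :=
  PySem.Dict.mk
    [ ("DEFINITION", [["\""], [" means "]])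
    , ("EXCLUSION", [["not cover", "does not", "excluded", "except", "exclusion"]])
    , ("COVERAGE_GRANT", [["we will pay", "we cover", "this policy covers"]])
    , ("CONDITION", [["condition", "must be", "required to", "you must", "insured shall"]])
    , ("SUB_LIMIT", [["limit of", "$", "maximum of", "up to"], ["per", "for", "each"]]) ]

def is_simple_element_py_alt (element : List (String × String)) (element_type : String) : Bool :=
  let text := PySem.Str.lower (((PySem.Dict.mk element).get? "text").getD "")
  match pvRules.get? element_type with
  | none => false
  | some groups => groups.all (fun group => group.any (fun sub => PySem.Str.isIn sub text))

-- ===== PRECONDITION & SPEC =====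
def Spec_is_simple_element_py (element : List (String × String)) (element_type : String) (out : Bool) : Prop := out = is_simple_element_py_alt element element_type
instance (element : List (String × String)) (element_type : String) (out : Bool) : Decidable (Spec_is_simple_element_py element element_type out) := by unfold Spec_is_simple_element_py; infer_instance

-- ===== CLAIM (what is proved, stated in full; the proofs are below) =====
def Claim_equal_is_simple_element_py : Prop := ∀ (element : List (String × String)) (element_type : String), Dom_is_simple_element_py element element_type → Spec_is_simple_element_py element element_type (is_simple_element_py element element_type)

-- ===== LEMMAS AND PROOFS =====

-- ===== VERDICT (by name: the statement is the Claim_ definition above) =====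
theorem is_simple_element_py_spec : Claim_equal_is_simple_element_py := by
  intro element element_type _
  unfold Spec_is_simple_element_py is_simple_element_py is_simple_element_py_alt pvRules
  by_cases h1 : element_type = "DEFINITION"
  · subst h1; simp [PySem.Dict.get?_mk_cons]
  by_cases h2 : element_type = "EXCLUSION"
  · subst h2; simp [PySem.Dict.get?_mk_cons]
  by_cases h3 : element_type = "COVERAGE_GRANT"
  · subst h3; simp [PySem.Dict.get?_mk_cons]
  by_cases h4 : element_type = "CONDITION"
  · subst h4; simp [PySem.Dict.get?_mk_cons]
  by_cases h5 : element_type = "SUB_LIMIT"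
  · subst h5; simp [PySem.Dict.get?_mk_cons]
  · have e1 : (("DEFINITION" : String) == element_type) = false := by simp [Ne.symm h1]
    have e2 : (("EXCLUSION" : String) == element_type) = false := by simp [Ne.symm h2]
    have e3 : (("COVERAGE_GRANT" : String) == element_type) = false := by simp [Ne.symm h3]
    have e4 : (("CONDITION" : String) == element_type) = false := by simp [Ne.symm h4]
    have e5 : (("SUB_LIMIT" : String) == element_type) = false := by simp [Ne.symm h5]
    simp [PySem.Dict.get?, List.find?, h1, h2, h3, h4, h5, e1, e2, e3, e4, e5]
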